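-- pv_equiv track=rewrite | github.com/gshanr/smartmeship | looci-contiki-git/tools/elfstripper/strip.py | _calculate_offsets
-- ===== SOURCE A (Python) =====
-- def _calculate_offsets(sizes):
--     offsets = list()
--     offsets.append(0)
--     total = 0
--     for size in sizes:
--         total = total + size
--         offsets.append(total)
--     offsets.pop() #last one is useless
--     return offsets
-- ===== SOURCE B (Python) =====
-- def _calculate_offsets(sizes):
--     sizes = list(sizes)
--     return [sum(sizes[:i]) for i in range(len(sizes))]
-- ===== Notes on version B (the rewrite author's own statement) =====
-- stated objective: simpler
-- what changed: Replaces the running-total accumulator with append-then-pop by a one-line comprehension that computes each offset independently as the sum of the prefix slice sizes[:i].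
import Mathlib
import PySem

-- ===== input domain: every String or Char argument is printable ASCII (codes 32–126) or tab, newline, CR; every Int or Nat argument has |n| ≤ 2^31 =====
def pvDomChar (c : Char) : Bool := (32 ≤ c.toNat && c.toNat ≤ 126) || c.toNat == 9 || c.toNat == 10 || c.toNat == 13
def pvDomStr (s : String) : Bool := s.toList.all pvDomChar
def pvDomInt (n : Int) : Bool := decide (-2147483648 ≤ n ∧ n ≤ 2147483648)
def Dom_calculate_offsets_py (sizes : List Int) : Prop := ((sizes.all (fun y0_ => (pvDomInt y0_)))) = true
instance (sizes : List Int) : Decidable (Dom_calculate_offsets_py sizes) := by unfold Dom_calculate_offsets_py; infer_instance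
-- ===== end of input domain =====

-- B replaces A's running-total pass (append then pop) by a comprehension summing the prefix slice sizes[:i] for each index: simpler to read, not faster.


-- ===== PORT A =====
-- offsets = [0]; total = 0; for size in sizes: total += size; offsets.append(total); offsets.pop()
def calculate_offsets_py (sizes : List Int) : List Int :=
  (sizes.foldl (fun (st : List Int × Int) size =>
    (st.1 ++ [st.2 + size], st.2 + size)) ([(0 : Int)], (0 : Int))).1.dropLast

-- ===== PORT B =====
-- [sum(sizes[:i]) for i in range(len(sizes))]
def calculate_offsets_py_alt (sizes : List Int) : List Int :=
  (PySem.List.pyRange 0 (sizes.length : Int) 1).map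
    (fun i => (PySem.List.slice sizes none (some i)).sum)

-- ===== PRECONDITION & SPEC =====
def Spec_calculate_offsets_py (sizes : List Int) (out : List Int) : Prop := out = calculate_offsets_py_alt sizes
instance (sizes : List Int) (out : List Int) : Decidable (Spec_calculate_offsets_py sizes out) := by unfold Spec_calculate_offsets_py; infer_instance

-- ===== CLAIM (what is proved, stated in full; the proofs are below) =====
def Claim_equal_calculate_offsets_py : Prop := ∀ (sizes : List Int), Dom_calculate_offsets_py sizes → Spec_calculate_offsets_py sizes (calculate_offsets_py sizes)

-- ===== LEMMAS AND PROOFS =====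

-- partial sums of `sizes` starting from the running total `t` (the values A appends)
def pvPsums (t : Int) : List Int → List Int
  | [] => []
  | s :: rest => (t + s) :: pvPsums (t + s) rest

theorem pvFoldA (sizes : List Int) : ∀ (acc : List Int) (t : Int),
    (sizes.foldl (fun (st : List Int × Int) size =>
      (st.1 ++ [st.2 + size], st.2 + size)) (acc, t)).1 = acc ++ pvPsums t sizes := by
  induction sizes with
  | nil => intro acc t; simp [pvPsums]
  | cons s rest ih =>
    intro acc t
    simp only [List.foldl_cons, pvPsums]
    rw [ih]
    simp

theorem pvDropLast (sizes : List Int) : ∀ (t : Int),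
    (t :: pvPsums t sizes).dropLast
      = (List.range sizes.length).map (fun k => t + (sizes.take k).sum) := by
  induction sizes with
  | nil => intro t; simp [pvPsums]
  | cons s rest ih =>
    intro t
    simp only [pvPsums, List.dropLast_cons₂, List.length_cons,
      List.range_succ_eq_map, List.map_cons, List.map_map]
    rw [ih (t + s)]
    simp only [List.take_zero, List.sum_nil, add_zero]
    congr 1
    apply List.map_congr_left
    intro k _
    simp [List.take_succ_cons, add_assoc]

-- ===== VERDICT (by name: the statement is the Claim_ definition above) =====
theorem calculate_offsets_py_spec : Claim_equal_calculate_offsets_py := by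
  intro sizes _
  unfold Spec_calculate_offsets_py calculate_offsets_py calculate_offsets_py_alt
  rw [pvFoldA sizes [0] 0]
  have h0 : ([ (0 : Int) ] ++ pvPsums 0 sizes) = (0 : Int) :: pvPsums 0 sizes := rfl
  rw [h0, pvDropLast sizes 0, PySem.List.pyRange_zero_nat sizes.length, List.map_map]
  apply List.map_congr_left
  intro k _
  simp [PySem.List.slice_to sizes (Int.natCast_nonneg k)]
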